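-- pv_equiv track=rewrite | github.com/unioslo/pysquril | pysquril/parser.py | categorise_groups
-- ===== SOURCE A (Python) =====
-- def categorise_groups(groups: list) -> tuple:
--     start, end = [], []
--     for bracket in groups:
--         if bracket == '(':
--             start.append(bracket)
--         elif bracket == ')':
--             end.append(bracket)
--     return start, end
-- ===== SOURCE B (Python) =====
-- def categorise_groups(groups: list) -> tuple:
--     return ['('] * groups.count('('), [')'] * groups.count(')')
-- ===== Notes on version B (the rewrite author's own statement) =====
-- stated objective: simpler
-- what changed: Replaces the single-pass loop that appends into two bucket lists with a count-then-materialize construction: each output list is homogeneous, so B counts '(' and ')' and builds the lists by replication.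
import Mathlib
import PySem

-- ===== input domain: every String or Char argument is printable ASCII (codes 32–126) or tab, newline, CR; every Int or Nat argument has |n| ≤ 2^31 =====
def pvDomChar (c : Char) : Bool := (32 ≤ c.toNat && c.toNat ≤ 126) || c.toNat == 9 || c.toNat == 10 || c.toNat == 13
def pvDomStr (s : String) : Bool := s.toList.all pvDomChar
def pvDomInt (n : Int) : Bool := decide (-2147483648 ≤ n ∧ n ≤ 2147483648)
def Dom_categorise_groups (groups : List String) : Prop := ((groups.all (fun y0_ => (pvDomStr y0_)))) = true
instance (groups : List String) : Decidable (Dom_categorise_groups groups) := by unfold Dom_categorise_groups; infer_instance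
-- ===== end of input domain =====

-- B replaces the single-pass bucket-appending loop with count-then-replicate construction (simpler).

-- ===== PORT A =====
-- loop: for bracket in groups: if '(' append to start elif ')' append to end
def categorise_groups (groups : List String) : List String × List String :=
  groups.foldl
    (fun acc bracket =>
      if bracket == "(" then (acc.1 ++ [bracket], acc.2)
      else if bracket == ")" then (acc.1, acc.2 ++ [bracket])
      else acc)
    ([], [])

-- ===== PORT B =====
-- ['('] * groups.count('(') , [')'] * groups.count(')')
def categorise_groups_alt (groups : List String) : List String × List String :=
  (List.replicate (PySem.List.count groups "(") "(",
   List.replicate (PySem.List.count groups ")") ")")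

-- ===== PRECONDITION & SPEC =====
def Spec_categorise_groups (groups : List String) (out : List String × List String) : Prop := out = categorise_groups_alt groups
instance (groups : List String) (out : List String × List String) : Decidable (Spec_categorise_groups groups out) := by unfold Spec_categorise_groups; infer_instance

-- ===== CLAIM (what is proved, stated in full; the proofs are below) =====
def Claim_equal_categorise_groups : Prop := ∀ (groups : List String), Dom_categorise_groups groups → Spec_categorise_groups groups (categorise_groups groups)

-- ===== LEMMAS AND PROOFS =====
theorem categorise_groups_foldl (groups s e : List String) :
    groups.foldl
      (fun acc bracket =>
        if bracket == "(" then (acc.1 ++ [bracket], acc.2)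
        else if bracket == ")" then (acc.1, acc.2 ++ [bracket])
        else acc)
      (s, e)
    = (s ++ List.replicate (groups.count "(") "(",
       e ++ List.replicate (groups.count ")") ")") := by
  induction groups generalizing s e with
  | nil => simp
  | cons x xs ih =>
    simp only [List.foldl_cons]
    by_cases hx : x = "("
    · subst hx
      simp only [beq_self_eq_true, if_true, ih]
      simp [List.replicate_succ]
    · by_cases hy : x = ")"
      · subst hy
        simp only [show ((")" : String) == "(") = false by decide, Bool.false_eq_true,
          if_false, beq_self_eq_true, if_true, ih]
        simp [List.replicate_succ]
      · have h1 : (x == "(") = false := by simp [hx]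
        have h2 : (x == ")") = false := by simp [hy]
        simp only [h1, h2, Bool.false_eq_true, if_false]
        rw [ih]
        simp [hx, hy]

-- ===== VERDICT (by name: the statement is the Claim_ definition above) =====
theorem categorise_groups_spec : Claim_equal_categorise_groups := by
  intro groups _
  unfold Spec_categorise_groups categorise_groups categorise_groups_alt
  rw [categorise_groups_foldl]
  simp [PySem.List.count_eq]
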